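-- pv_equiv track=rewrite | github.com/Kawser-nerd/CLCDSA | Source Codes/AtCoder/abc028/C/4924575.py | select3
-- ===== SOURCE A (Python) =====
-- def select3(A: int, B: int, C: int, D: int, E: int) -> int:
--     l = [A, B, C, D, E]
--     res = []
--
--     for i in range(1 << 5):
--         s, c = 0, 0
--         for j in range(5):
--             if i & (1 << j) == 0:
--                 continue
--             s += l[j]
--             c += 1
--         if c != 3:
--             continue
--         res.append(s)
--
--     return sorted(res, key=lambda x: - x)[2]
-- ===== SOURCE B (Python) =====
-- def select3(A: int, B: int, C: int, D: int, E: int) -> int: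
--     # third largest triple sum = total - third smallest pair sum (complement identity)
--     nums = [A, B, C, D, E]
--     total = A + B + C + D + E
--     pair_sums = []
--     for i in range(5):
--         for j in range(i + 1, 5):
--             pair_sums.append(nums[i] + nums[j])
--     pair_sums.sort()
--     return total - pair_sums[2]
-- ===== Notes on version B (the rewrite author's own statement) =====
-- stated objective: alternative
-- what changed: Instead of enumerating all 32 bitmasks, keeping the popcount-3 ones and sorting the 10 triple sums descending, B enumerates the 10 two-element pairs, sorts their sums ascending and returns total minus the third-smallest pair sum, using the complement identity triple_sum = total - pair_sum.
import Mathlib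
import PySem

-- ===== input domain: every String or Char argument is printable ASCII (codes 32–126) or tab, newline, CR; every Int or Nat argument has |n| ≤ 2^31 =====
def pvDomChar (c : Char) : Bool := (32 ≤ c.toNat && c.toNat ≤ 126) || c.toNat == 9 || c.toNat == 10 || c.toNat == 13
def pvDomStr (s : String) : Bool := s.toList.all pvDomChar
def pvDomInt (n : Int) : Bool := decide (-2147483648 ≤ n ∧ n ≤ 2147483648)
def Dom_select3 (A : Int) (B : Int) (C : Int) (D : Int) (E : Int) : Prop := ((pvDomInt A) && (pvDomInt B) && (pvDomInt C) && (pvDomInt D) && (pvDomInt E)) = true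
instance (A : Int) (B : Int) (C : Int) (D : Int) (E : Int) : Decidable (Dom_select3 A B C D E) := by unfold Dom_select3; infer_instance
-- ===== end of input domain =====

-- B replaces A's 32-bitmask triple enumeration by the complement identity
-- (triple sum = total - pair sum): it sorts the 10 pair sums ascending and
-- returns total minus the third smallest; a different decomposition, same cost.


-- ===== PORT A =====
def select3 (A : Int) (B : Int) (C : Int) (D : Int) (E : Int) : Int :=
  let l := [A, B, C, D, E]
  let res := (PySem.List.pyRange 0 ((1:Int) <<< 5) 1).foldl (fun res i =>
    let sc := (PySem.List.pyRange 0 5 1).foldl (fun (sc : Int × Int) j =>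
      if PySem.Int.band i ((1:Int) <<< j.toNat) == 0 then sc
      else (sc.1 + PySem.List.pyGetD l j 0, sc.2 + 1)) ((0:Int), (0:Int))
    if sc.2 ≠ 3 then res else res ++ [sc.1]) []
  -- res always has exactly 10 elements, so the [2] index never raises: pyGetD is exact here
  PySem.List.pyGetD (PySem.List.sorted res (fun x => -x) false) 2 0

-- ===== PORT B =====
def select3_alt (A : Int) (B : Int) (C : Int) (D : Int) (E : Int) : Int :=
  let nums := [A, B, C, D, E]
  let total := A + B + C + D + E
  let pairSums := (PySem.List.pyRange 0 5 1).foldl (fun acc i =>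
    (PySem.List.pyRange (i + 1) 5 1).foldl (fun acc2 j =>
      acc2 ++ [PySem.List.pyGetD nums i 0 + PySem.List.pyGetD nums j 0]) acc) []
  -- pairSums always has exactly 10 elements, so the [2] index never raises: pyGetD is exact here
  let s := PySem.List.sorted pairSums (fun x => x) false
  total - PySem.List.pyGetD s 2 0

-- ===== PRECONDITION & SPEC =====
def Spec_select3 (A : Int) (B : Int) (C : Int) (D : Int) (E : Int) (out : Int) : Prop := out = select3_alt A B C D E
instance (A : Int) (B : Int) (C : Int) (D : Int) (E : Int) (out : Int) : Decidable (Spec_select3 A B C D E out) := by unfold Spec_select3; infer_instance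

-- ===== CLAIM (what is proved, stated in full; the proofs are below) =====
def Claim_equal_select3 : Prop := ∀ (A : Int) (B : Int) (C : Int) (D : Int) (E : Int), Dom_select3 A B C D E → Spec_select3 A B C D E (select3 A B C D E)

-- ===== LEMMAS AND PROOFS =====

-- A's loop, fully unrolled (definitional: all control flow is concrete)
theorem selA_eq (A B C D E : Int) : select3 A B C D E =
    PySem.List.pyGetD (PySem.List.sorted
      [0+A+B+C, 0+A+B+D, 0+A+C+D, 0+B+C+D, 0+A+B+E, 0+A+C+E, 0+B+C+E, 0+A+D+E, 0+B+D+E, 0+C+D+E]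
      (fun x => -x) false) 2 0 := rfl

-- B's loop, fully unrolled
theorem selB_eq (A B C D E : Int) : select3_alt A B C D E =
    (A + B + C + D + E) - PySem.List.pyGetD (PySem.List.sorted
      [A+B, A+C, A+D, A+E, B+C, B+D, B+E, C+D, C+E, D+E]
      (fun x => x) false) 2 0 := rfl

-- index pairs: B's enumeration order and the complement order of A's masks
def idxB : List (Nat × Nat) := [(0,1),(0,2),(0,3),(0,4),(1,2),(1,3),(1,4),(2,3),(2,4),(3,4)]
def idxA : List (Nat × Nat) := [(3,4),(2,4),(1,4),(0,4),(2,3),(1,3),(0,3),(1,2),(0,2),(0,1)]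

theorem idx_perm : idxA.Perm idxB := by decide

-- A's triple sums are total minus the complement pair sums (in idxA order)
theorem resA_eq (A B C D E : Int) :
    ([0+A+B+C, 0+A+B+D, 0+A+C+D, 0+B+C+D, 0+A+B+E, 0+A+C+E, 0+B+C+E, 0+A+D+E, 0+B+D+E, 0+C+D+E] : List Int)
      = idxA.map (fun p => (A + B + C + D + E) -
          ([A,B,C,D,E].getD p.1 0 + [A,B,C,D,E].getD p.2 0)) := by
  simp only [idxA, List.map, List.getD, List.getElem?_cons_zero, List.getElem?_cons_succ,
    Option.getD_some, List.cons.injEq, and_true]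
  norm_num
  and_intros <;> ring

theorem pairsB_eq (A B C D E : Int) :
    ([A+B, A+C, A+D, A+E, B+C, B+D, B+E, C+D, C+E, D+E] : List Int)
      = idxB.map (fun p => [A,B,C,D,E].getD p.1 0 + [A,B,C,D,E].getD p.2 0) := rfl

-- the two sorted lists agree elementwise: map (total - ·) reverses order
theorem sorted_eq (A B C D E : Int) :
    PySem.List.sorted
      [0+A+B+C, 0+A+B+D, 0+A+C+D, 0+B+C+D, 0+A+B+E, 0+A+C+E, 0+B+C+E, 0+A+D+E, 0+B+D+E, 0+C+D+E]
      (fun x => -x) false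
    = (PySem.List.sorted [A+B, A+C, A+D, A+E, B+C, B+D, B+E, C+D, C+E, D+E]
        (fun x => x) false).map (fun p => (A + B + C + D + E) - p) := by
  set t := A + B + C + D + E with ht
  set f : Nat × Nat → Int := fun p => [A,B,C,D,E].getD p.1 0 + [A,B,C,D,E].getD p.2 0 with hf
  have hperm : (PySem.List.sorted
      [0+A+B+C, 0+A+B+D, 0+A+C+D, 0+B+C+D, 0+A+B+E, 0+A+C+E, 0+B+C+E, 0+A+D+E, 0+B+D+E, 0+C+D+E]
      (fun x => -x) false).Perm
      ((PySem.List.sorted [A+B, A+C, A+D, A+E, B+C, B+D, B+E, C+D, C+E, D+E]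
        (fun x => x) false).map (fun p => t - p)) := by
    refine (PySem.List.sorted_perm _ _ _).trans ?_
    rw [resA_eq A B C D E, pairsB_eq A B C D E]
    refine ((idx_perm.map (fun p => t - f p)).trans ?_)
    rw [show idxB.map (fun p => t - f p) = (idxB.map f).map (fun p => t - p) by
      simp [List.map_map]]
    exact ((PySem.List.sorted_perm _ _ _).symm.map _)
  refine List.Perm.eq_of_pairwise (le := fun a b : Int => b ≤ a)
    (fun a b _ _ h1 h2 => le_antisymm h2 h1) ?_ ?_ hperm
  · exact (PySem.List.sorted_pairwise _ _).imp (fun h => by omega)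
  · exact List.Pairwise.map _ (fun {a b} h => by omega)
      (PySem.List.sorted_pairwise [A+B, A+C, A+D, A+E, B+C, B+D, B+E, C+D, C+E, D+E] (fun x => x))

theorem main_eq (A B C D E : Int) : select3 A B C D E = select3_alt A B C D E := by
  rw [selA_eq, selB_eq, sorted_eq]
  set S := PySem.List.sorted [A+B, A+C, A+D, A+E, B+C, B+D, B+E, C+D, C+E, D+E]
    (fun x => x) false with hS
  have hlen : S.length = 10 := by
    rw [hS, PySem.List.length_sorted]; rfl
  have h2 : (2 : Int) < (S.length : Int) := by omega
  have h2m : (2 : Int) < ((S.map (fun p => (A + B + C + D + E) - p)).length : Int) := by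
    simp [hlen]
  rw [PySem.List.pyGetD_eq_getElem _ _ (by norm_num) h2m, PySem.List.pyGetD_eq_getElem _ _ (by norm_num) h2]
  simp

-- ===== VERDICT (by name: the statement is the Claim_ definition above) =====
theorem select3_spec : Claim_equal_select3 := by
  intro A B C D E _
  unfold Spec_select3
  exact main_eq A B C D E
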